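-- pv_equiv track=rewrite | github.com/technolapin/sable | pink/python/pink/MICCAI/headers_to_4D.py | elem_group
-- ===== SOURCE A (Python) =====
-- def elem_group(set_of, list):
--     curr=list[0]
--     result={}
--     pos_glob=0
--     pos_loc=0
--     for q in list:
--         if curr!=q:
--             pos_loc=0
--             curr=q
--
--         result[set_of[pos_glob]]=pos_loc
--         pos_glob+=1
--         pos_loc+=1
--     return result
-- ===== SOURCE B (Python) =====
-- def elem_group(set_of, list):
--     # run-length encode, expand to local indices, then pair with set_of
--     runs = []
--     for q in list:
--         if runs and runs[-1][0] == q: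
--             runs[-1][1] += 1
--         else:
--             runs.append([q, 1])
--     locs = [i for _, n in runs for i in range(n)]
--     return dict(zip(set_of, locs))
-- ===== Notes on version B (the rewrite author's own statement) =====
-- stated objective: alternative
-- what changed: B first run-length-encodes the list, expands the runs into the sequence of local indices, and builds the dict in one dict(zip(set_of, locs)) step, instead of A's flat pass branching on curr != q with two mutable counters.
import Mathlib
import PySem

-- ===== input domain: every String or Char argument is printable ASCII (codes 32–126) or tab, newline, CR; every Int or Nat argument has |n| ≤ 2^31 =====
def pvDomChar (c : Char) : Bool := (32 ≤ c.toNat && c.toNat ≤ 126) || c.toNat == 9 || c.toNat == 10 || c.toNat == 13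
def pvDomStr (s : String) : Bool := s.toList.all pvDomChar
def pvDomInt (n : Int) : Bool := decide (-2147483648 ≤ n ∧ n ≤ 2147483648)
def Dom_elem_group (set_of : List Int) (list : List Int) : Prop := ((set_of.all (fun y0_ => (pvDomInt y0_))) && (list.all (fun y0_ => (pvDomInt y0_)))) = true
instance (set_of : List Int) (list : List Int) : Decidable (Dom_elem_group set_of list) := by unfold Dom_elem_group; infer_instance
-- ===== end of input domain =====

-- B run-length-encodes the list, expands runs into the local-index sequence and builds the dict with one dict(zip(...)); alternative decomposition, same cost.

-- ===== PORT A =====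
def elem_group (set_of : List Int) (list : List Int) : List (Int × Int) :=
  -- curr = list[0] (Pre_ excludes the empty list, where Python raises IndexError)
  let curr : Int := PySem.List.pyGetD list 0 0
  let st := list.foldl
    (fun (st : Int × PySem.Dict Int Int × Int × Int) q =>
      let curr := st.1
      let result := st.2.1
      let pos_glob := st.2.2.1
      let pos_loc := st.2.2.2
      let pc : Int × Int := if curr ≠ q then (0, q) else (pos_loc, curr)
      -- set_of[pos_glob]: in range under Pre_ (Python raises IndexError otherwise)
      let result := result.insert (PySem.List.pyGetD set_of pos_glob 0) pc.1
      (pc.2, result, pos_glob + 1, pc.1 + 1))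
    (curr, PySem.Dict.empty, 0, 0)
  st.2.1.items

-- ===== PORT B =====
def elem_group_alt (set_of : List Int) (list : List Int) : List (Int × Int) :=
  let runs := list.foldl
    (fun (runs : List (Int × Int)) q =>
      match runs.getLast? with
      | some (r, n) => if r = q then runs.dropLast ++ [(r, n + 1)] else runs ++ [(q, 1)]
      | none => [(q, 1)])
    []
  let locs := runs.flatMap (fun p => PySem.List.pyRange 0 p.2 1)
  ((set_of.zip locs).foldl (fun d kv => d.insert kv.1 kv.2) PySem.Dict.empty).items

-- ===== PRECONDITION & SPEC =====
-- Pre_ excludes exactly the inputs where A raises IndexError: an empty list (list[0]) and a set_of shorter than list (set_of[pos_glob]).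
def Pre_elem_group (set_of : List Int) (list : List Int) : Prop :=
  list ≠ [] ∧ list.length ≤ set_of.length
instance (set_of : List Int) (list : List Int) : Decidable (Pre_elem_group set_of list) := by unfold Pre_elem_group; infer_instance

def pvWitness_elem_group : List Int × List Int := ([10, 20, 30], [7, 7, 8])

def Spec_elem_group (set_of : List Int) (list : List Int) (out : List (Int × Int)) : Prop := out = elem_group_alt set_of list
instance (set_of : List Int) (list : List Int) (out : List (Int × Int)) : Decidable (Spec_elem_group set_of list out) := by unfold Spec_elem_group; infer_instance

-- ===== CLAIM (what is proved, stated in full; the proofs are below) =====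
def Claim_equal_elem_group : Prop := ∀ (set_of : List Int) (list : List Int), Dom_elem_group set_of list → Pre_elem_group set_of list → Spec_elem_group set_of list (elem_group set_of list)

-- ===== LEMMAS AND PROOFS =====

-- canonical local-index sequence: locAux curr ploc l is the list of local run indices of l,
-- given that the element before l was curr with next local index ploc
def locAux : Int → Int → List Int → List Int
  | _, _, [] => []
  | curr, ploc, q :: rest =>
    let m : Int := if curr ≠ q then 0 else ploc
    m :: locAux q (m + 1) rest

-- B's run fold step / flattening, named for the lemmas
def runStep (runs : List (Int × Int)) (q : Int) : List (Int × Int) :=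
  match runs.getLast? with
  | some (r, n) => if r = q then runs.dropLast ++ [(r, n + 1)] else runs ++ [(q, 1)]
  | none => [(q, 1)]

def flatRuns (runs : List (Int × Int)) : List Int :=
  runs.flatMap (fun p => PySem.List.pyRange 0 p.2 1)

theorem flat_foldl_runStep (rest : List Int) :
    ∀ (runs : List (Int × Int)) (r n : Int), runs.getLast? = some (r, n) → 0 ≤ n →
    flatRuns (rest.foldl runStep runs) = flatRuns runs ++ locAux r n rest := by
  induction rest with
  | nil => intro runs r n h hn; simp [locAux]
  | cons q rest ih =>
    intro runs r n h hn
    have hne : runs ≠ [] := by intro hh; simp [hh] at h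
    have hg : runs.getLast hne = (r, n) := by
      have h2 := List.getLast?_eq_some_getLast (l := runs) hne
      rw [h] at h2
      exact (Option.some_inj.mp h2).symm
    have hdecomp : runs.dropLast ++ [(r, n)] = runs := by
      rw [← hg]; exact List.dropLast_append_getLast hne
    by_cases hrq : r = q
    · subst hrq
      have hstep : runStep runs r = runs.dropLast ++ [(r, n + 1)] := by
        simp [runStep, h]
      have hlast : (runs.dropLast ++ [(r, n + 1)]).getLast? = some (r, n + 1) := by
        simp
      have hih := ih (runs.dropLast ++ [(r, n + 1)]) r (n + 1) hlast (by omega)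
      simp only [List.foldl_cons, hstep, hih]
      have hflat : flatRuns (runs.dropLast ++ [(r, n + 1)]) =
          flatRuns runs.dropLast ++ (PySem.List.pyRange 0 n 1 ++ [n]) := by
        simp [flatRuns, List.flatMap_append]
        rw [PySem.List.pyRange_one_succ_right hn]
      have hflat0 : flatRuns runs = flatRuns runs.dropLast ++ PySem.List.pyRange 0 n 1 := by
        conv_lhs => rw [← hdecomp]
        simp [flatRuns, List.flatMap_append]
      rw [hflat, hflat0]
      have hloc : locAux r n (r :: rest) = n :: locAux r (n + 1) rest := by
        simp [locAux]
      rw [hloc]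
      simp
    · have hstep : runStep runs q = runs ++ [(q, 1)] := by
        simp [runStep, h, hrq]
      have hlast : (runs ++ [(q, 1)]).getLast? = some (q, 1) := by simp
      have := ih (runs ++ [(q, 1)]) q 1 hlast (by omega)
      simp only [List.foldl_cons, hstep, this]
      have hflat : flatRuns (runs ++ [(q, 1)]) = flatRuns runs ++ [0] := by
        simp [flatRuns, List.flatMap_append]
        rfl
      rw [hflat]
      have hloc : locAux r n (q :: rest) = 0 :: locAux q 1 rest := by
        simp [locAux, hrq]
      rw [hloc]
      simp
-- A's loop body, named so the A-side lemma can speak about it (definitionally the fold body of the port)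
def aStep (set_of : List Int) (st : Int × PySem.Dict Int Int × Int × Int) (q : Int) :
    Int × PySem.Dict Int Int × Int × Int :=
  let curr := st.1
  let result := st.2.1
  let pos_glob := st.2.2.1
  let pos_loc := st.2.2.2
  let pc : Int × Int := if curr ≠ q then (0, q) else (pos_loc, curr)
  let result := result.insert (PySem.List.pyGetD set_of pos_glob 0) pc.1
  (pc.2, result, pos_glob + 1, pc.1 + 1)

theorem a_fold_eq (set_of : List Int) (lst : List Int) :
    ∀ (curr ploc : Int) (d : PySem.Dict Int Int) (i : Int), 0 ≤ i →
    i.toNat + lst.length ≤ set_of.length →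
    (lst.foldl (aStep set_of) (curr, d, i, ploc)).2.1 =
      ((set_of.drop i.toNat).zip (locAux curr ploc lst)).foldl
        (fun d kv => d.insert kv.1 kv.2) d := by
  induction lst with
  | nil => intro curr ploc d i hi hlen; simp [locAux]
  | cons q rest ih =>
    intro curr ploc d i hi hlen
    have hlt : i.toNat < set_of.length := by
      simp only [List.length_cons] at hlen; omega
    have hdrop : set_of.drop i.toNat = set_of[i.toNat] :: set_of.drop (i.toNat + 1) :=
      (List.getElem_cons_drop hlt).symm
    have hget : PySem.List.pyGetD set_of i 0 = set_of[i.toNat] :=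
      PySem.List.pyGetD_eq_getElem set_of 0 hi (by omega)
    have hsucc : (i + 1).toNat = i.toNat + 1 := by omega
    by_cases hc : curr = q
    · have hstep : aStep set_of (curr, d, i, ploc) q =
          (curr, d.insert set_of[i.toNat] ploc, i + 1, ploc + 1) := by
        simp [aStep, hc, hget]
      have hih := ih curr (ploc + 1) (d.insert set_of[i.toNat] ploc) (i + 1) (by omega)
        (by simp only [List.length_cons] at hlen; omega)
      rw [List.foldl_cons, hstep]
      rw [hdrop]
      have hloc : locAux curr ploc (q :: rest) = ploc :: locAux q (ploc + 1) rest := by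
        simp [locAux, hc]
      rw [hloc, List.zip_cons_cons, List.foldl_cons]
      rw [hsucc] at hih
      subst hc
      exact hih
    · have hstep : aStep set_of (curr, d, i, ploc) q =
          (q, d.insert set_of[i.toNat] 0, i + 1, 0 + 1) := by
        simp [aStep, hc, hget]
      have hih := ih q (0 + 1) (d.insert set_of[i.toNat] 0) (i + 1) (by omega)
        (by simp only [List.length_cons] at hlen; omega)
      rw [List.foldl_cons, hstep]
      rw [hdrop]
      have hloc : locAux curr ploc (q :: rest) = 0 :: locAux q (0 + 1) rest := by
        simp [locAux, hc]
      rw [hloc, List.zip_cons_cons, List.foldl_cons]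
      rw [hsucc] at hih
      exact hih

-- ===== VERDICT (by name: the statement is the Claim_ definition above) =====
theorem elem_group_spec : Claim_equal_elem_group := by
  intro set_of list _ hpre
  obtain ⟨hne, hlen⟩ := hpre
  unfold Spec_elem_group
  cases list with
  | nil => exact absurd rfl hne
  | cons q rest =>
    have hA : elem_group set_of (q :: rest) =
        ((q :: rest).foldl (aStep set_of)
          (PySem.List.pyGetD (q :: rest) 0 0, PySem.Dict.empty, 0, 0)).2.1.items := rfl
    have hB : elem_group_alt set_of (q :: rest) =
        ((set_of.zip (flatRuns ((q :: rest).foldl runStep []))).foldl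
          (fun d kv => d.insert kv.1 kv.2) PySem.Dict.empty).items := rfl
    rw [hA, hB]
    have hcurr : PySem.List.pyGetD (q :: rest) 0 0 = q := PySem.List.pyGetD_zero_cons q rest 0
    rw [hcurr]
    have hAfold := a_fold_eq set_of (q :: rest) q 0 PySem.Dict.empty 0 (le_refl 0)
      (by simpa using hlen)
    simp only [Int.toNat_zero, List.drop_zero] at hAfold
    rw [hAfold]
    have hBruns : (q :: rest).foldl runStep [] = rest.foldl runStep [(q, 1)] := rfl
    have hBflat : flatRuns (rest.foldl runStep [(q, 1)]) =
        flatRuns [(q, 1)] ++ locAux q 1 rest :=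
      flat_foldl_runStep rest [(q, 1)] q 1 rfl (by omega)
    have hflat1 : flatRuns [(q, 1)] = [0] := rfl
    have hloc0 : locAux q 0 (q :: rest) = 0 :: locAux q 1 rest := by simp [locAux]
    rw [hBruns, hBflat, hflat1, hloc0]
    rfl
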